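-- pv_equiv track=rewrite | github.com/MichaelT-ai/TextSummarizer | summarizer.py | _simple_summarize
-- ===== SOURCE A (Python) =====
-- def _simple_summarize(text: str, max_length: int) -> str:
--     """
--     Simple sentence-based summarization fallback
--     """
--     sentences = text.split('. ')
--     summary_sentences = []
--     current_length = 0
--
--     for sentence in sentences:
--         if current_length + len(sentence) <= max_length:
--             summary_sentences.append(sentence)
--             current_length += len(sentence)
--         else:
--             break
--
--     result = '. '.join(summary_sentences)
--     if not result.endswith('.'):
--         result += '.'
--     return result
-- ===== SOURCE B (Python) =====
-- def _simple_summarize(text: str, max_length: int) -> str: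
--     """Two-pass re-implementation: prefix sums of sentence lengths, then
--     count how many cumulative sums fit the budget (valid because the sums
--     are nondecreasing), slice that leading prefix and join."""
--     sentences = text.split('. ')
--     cums = []
--     total = 0
--     for s in sentences:
--         total += len(s)
--         cums.append(total)
--     k = sum(1 for c in cums if c <= max_length)
--     summary = '. '.join(sentences[:k])
--     if not summary.endswith('.'):
--         summary += '.'
--     return summary
-- ===== Notes on version B (the rewrite author's own statement) =====
-- stated objective: alternative
-- what changed: Replaces the single greedy accumulate-and-break loop with two separate passes: first compute the running prefix sums of sentence lengths, then count how many prefix sums fit the budget (correct because the sums are nondecreasing) and join that leading slice.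
import Mathlib
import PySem

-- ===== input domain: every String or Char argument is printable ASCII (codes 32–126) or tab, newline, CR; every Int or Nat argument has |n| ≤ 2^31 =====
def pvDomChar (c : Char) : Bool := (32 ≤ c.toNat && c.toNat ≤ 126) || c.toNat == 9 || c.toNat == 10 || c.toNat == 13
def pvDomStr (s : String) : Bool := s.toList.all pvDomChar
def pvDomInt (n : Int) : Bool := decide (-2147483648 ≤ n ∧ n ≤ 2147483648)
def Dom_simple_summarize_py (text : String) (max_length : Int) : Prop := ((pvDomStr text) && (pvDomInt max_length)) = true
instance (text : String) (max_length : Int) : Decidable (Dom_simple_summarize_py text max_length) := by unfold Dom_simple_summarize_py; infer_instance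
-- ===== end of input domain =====

-- B replaces A's single greedy accumulate-and-break loop by two passes (prefix sums, then
-- count the fitting ones); same values everywhere (objective: alternative).

-- ===== PORT A =====
-- A's for-loop with break: structural recursion over the sentence list carrying the
-- accumulator list (reversed) and current_length.
def pvGoA (max_length : Int) : List String → List String → Int → List String
  | [], acc, _ => acc.reverse
  | s :: rest, acc, cur =>
    if cur + PySem.Str.len s ≤ max_length then
      pvGoA max_length rest (s :: acc) (cur + PySem.Str.len s)
    else acc.reverse

def simple_summarize_py (text : String) (max_length : Int) : String :=
  -- text.split('. '): separator is a nonempty literal, so split? is always `some`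
  let sentences := (PySem.Str.split? text ". ").getD []
  let summary_sentences := pvGoA max_length sentences [] 0
  let result := PySem.Str.join ". " summary_sentences
  if PySem.Str.endswith result "." then result else result ++ "."

-- ===== PORT B =====
def simple_summarize_py_alt (text : String) (max_length : Int) : String :=
  let sentences := (PySem.Str.split? text ". ").getD []
  -- pass 1: running prefix sums of sentence lengths
  let cums := (sentences.foldl
      (fun (p : List Int × Int) s =>
        let t := p.2 + PySem.Str.len s
        (p.1 ++ [t], t)) ([], 0)).1
  -- pass 2: k = sum(1 for c in cums if c <= max_length)
  let k : Int := cums.foldl (fun n c => if c ≤ max_length then n + 1 else n) 0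
  let summary := PySem.Str.join ". " (PySem.List.slice sentences none (some k))
  if PySem.Str.endswith summary "." then summary else summary ++ "."

-- ===== PRECONDITION & SPEC =====
def Spec_simple_summarize_py (text : String) (max_length : Int) (out : String) : Prop := out = simple_summarize_py_alt text max_length
instance (text : String) (max_length : Int) (out : String) : Decidable (Spec_simple_summarize_py text max_length out) := by unfold Spec_simple_summarize_py; infer_instance

-- ===== CLAIM (what is proved, stated in full; the proofs are below) =====
def Claim_equal_simple_summarize_py : Prop := ∀ (text : String) (max_length : Int), Dom_simple_summarize_py text max_length → Spec_simple_summarize_py text max_length (simple_summarize_py text max_length)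

-- ===== LEMMAS AND PROOFS =====

/-- Prefix sums of sentence lengths starting from `c` (proof-side characterisation). -/
def pvCums (c : Int) : List String → List Int
  | [] => []
  | s :: r => (c + PySem.Str.len s) :: pvCums (c + PySem.Str.len s) r

theorem pvCums_foldl (ss : List String) : ∀ (acc : List Int) (c : Int),
    (ss.foldl (fun (p : List Int × Int) s =>
        let t := p.2 + PySem.Str.len s
        (p.1 ++ [t], t)) (acc, c)).1 = acc ++ pvCums c ss := by
  induction ss with
  | nil => intro acc c; simp [pvCums]
  | cons s r ih =>
    intro acc c
    rw [List.foldl_cons]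
    exact (ih (acc ++ [c + PySem.Str.len s]) (c + PySem.Str.len s)).trans
      (by rw [pvCums]; simp)

theorem pvCount_foldl (M : Int) (cs : List Int) : ∀ (n0 : Int),
    cs.foldl (fun n c => if c ≤ M then n + 1 else n) n0
      = n0 + (cs.countP (fun c => decide (c ≤ M)) : Int) := by
  induction cs with
  | nil => intro n0; simp
  | cons c r ih =>
    intro n0
    by_cases h : c ≤ M
    · simp [List.foldl, h, ih]; ring
    · simp [List.foldl, h, ih]

theorem pvCums_lb (ss : List String) : ∀ (c : Int) (x : Int), x ∈ pvCums c ss → c ≤ x := by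
  induction ss with
  | nil => intro c x hx; simp [pvCums] at hx
  | cons s r ih =>
    intro c x hx
    have hlen : (0 : Int) ≤ PySem.Str.len s := by
      simp [PySem.Str.len]
    simp [pvCums] at hx
    rcases hx with h | h
    · omega
    · have := ih _ _ h; omega

theorem pvGoA_eq_take (M : Int) (ss : List String) : ∀ (acc : List String) (c : Int),
    pvGoA M ss acc c
      = acc.reverse ++ ss.take ((pvCums c ss).countP (fun x => decide (x ≤ M))) := by
  induction ss with
  | nil => intro acc c; simp [pvGoA, pvCums]
  | cons s r ih =>
    intro acc c
    simp only [pvGoA, pvCums, List.countP_cons]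
    by_cases h : c + (s.length : Int) ≤ M
    · simp [h, ih]
    · have hz : (pvCums (c + (s.length : Int)) r).countP (fun x => decide (x ≤ M)) = 0 := by
        rw [List.countP_eq_zero]
        intro x hx
        have hlb := pvCums_lb r _ x hx
        simp only [decide_eq_true_eq]
        omega
      simp [h, hz]

-- ===== VERDICT (by name: the statement is the Claim_ definition above) =====
theorem simple_summarize_py_spec : Claim_equal_simple_summarize_py := by
  intro text max_length _
  unfold Spec_simple_summarize_py simple_summarize_py simple_summarize_py_alt
  set sentences := (PySem.Str.split? text ". ").getD [] with hs
  have hcums := pvCums_foldl (c := 0) (acc := []) sentences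
  have hcount := pvCount_foldl max_length (pvCums 0 sentences) 0
  have hgo := pvGoA_eq_take max_length sentences [] 0
  set cnt := (pvCums 0 sentences).countP (fun x => decide (x ≤ max_length)) with hcnt
  have hk : ((pvCums 0 sentences).foldl (fun n c => if c ≤ max_length then n + 1 else n) 0)
      = (cnt : Int) := by rw [hcount]; ring
  have hslice : PySem.List.slice sentences none (some ((cnt : Nat) : Int)) = sentences.take cnt :=
    PySem.List.slice_to_natCast sentences cnt
  simp only [hcums, List.nil_append, hk, hslice, hgo, List.reverse_nil]
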